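-- pv_equiv track=rewrite | github.com/josiahadrineda/Daily-Coding-Problems | 266_ValidStepWords.py | valid_step_words
-- ===== SOURCE A (Python) =====
-- def valid_step_words(words, word):
--     """Given a list of words WORDS and an input_word WORD, returns all valid
--     step words from WORD, where a step word is defined as a word that is an anagram
--     of WORD after adding one more letter to WORD.
--
--     >>> valid_step_words(['appeal', 'apples', 'approve', 'apricot', 'alpine'], 'apple')
--     ['appeal', 'apples']
--     """
--     assert words, 'WORDS cannot be an empty list.'
--     assert word, 'WORD cannot be an empty string.'
--
--     def is_valid(w, word):
--         if len(w) != len(word) + 1: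
--             return False
--
--         for c in word:
--             try:
--                 w.remove(c)
--             except Exception as e:
--                 return False
--         return len(w) == 1
--
--     res = []
--     for w in words:
--         if is_valid(list(w), word):
--             res.append(w)
--     return res
-- ===== SOURCE B (Python) =====
-- def valid_step_words(words, word):
--     assert words, 'WORDS cannot be an empty list.'
--     assert word, 'WORD cannot be an empty string.'
--
--     sword = sorted(word)
--
--     def covers(sw, sword):
--         # two-pointer merge over the sorted lists: every char of sword must
--         # appear (with multiplicity) in sw
--         i = j = 0
--         while j < len(sword):
--             if i >= len(sw):
--                 return False
--             if sw[i] == sword[j]: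
--                 i += 1
--                 j += 1
--             elif sw[i] < sword[j]:
--                 i += 1
--             else:
--                 return False
--         return True
--
--     res = []
--     for w in words:
--         if len(w) == len(word) + 1 and covers(sorted(w), sword):
--             res.append(w)
--     return res
-- ===== Notes on version B (the rewrite author's own statement) =====
-- stated objective: alternative
-- what changed: Replaces A's per-word repeated list.remove scans (quadratic per word) with sorting each candidate once and a two-pointer merge over the two sorted character lists.
import Mathlib
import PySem

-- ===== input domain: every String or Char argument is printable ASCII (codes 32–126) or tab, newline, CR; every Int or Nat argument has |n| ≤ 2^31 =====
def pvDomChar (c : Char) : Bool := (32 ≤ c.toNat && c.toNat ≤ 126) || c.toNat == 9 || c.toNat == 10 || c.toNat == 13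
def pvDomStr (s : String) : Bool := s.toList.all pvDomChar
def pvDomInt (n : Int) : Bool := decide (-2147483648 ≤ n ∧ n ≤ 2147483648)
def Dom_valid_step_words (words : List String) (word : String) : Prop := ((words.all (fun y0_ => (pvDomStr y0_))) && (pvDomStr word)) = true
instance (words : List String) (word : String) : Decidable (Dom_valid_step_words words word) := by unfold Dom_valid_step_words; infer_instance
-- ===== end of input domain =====

-- B sorts each candidate once and checks containment by a two-pointer merge over
-- the sorted character lists, instead of A's repeated list.remove scans.

-- ===== PORT A =====
-- the 'for c in word: try w.remove(c) except: return False' loop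
def removeLoopA : List Char → List Char → Option (List Char)
  | [], w => some w
  | c :: cs, w =>
    match PySem.List.remove? w c with
    | none => none
    | some w' => removeLoopA cs w'

def isValidA (w word : List Char) : Bool :=
  if w.length ≠ word.length + 1 then false
  else
    match removeLoopA word w with
    | none => false
    | some w' => w'.length == 1

def valid_step_words (words : List String) (word : String) : List String :=
  words.foldl (fun res w => if isValidA w.toList word.toList then res ++ [w] else res) []

-- ===== PORT B =====
-- two-pointer merge: does sw (sorted) contain every char of sword (sorted), with multiplicity?
def coversB : List Char → List Char → Bool
  | _, [] => true
  | [], _ :: _ => false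
  | x :: xs, y :: ys =>
    if x == y then coversB xs ys
    else if x < y then coversB xs (y :: ys)
    else false

def valid_step_words_alt (words : List String) (word : String) : List String :=
  let sword := PySem.List.sorted word.toList (fun c => c) false
  words.foldl
    (fun res w =>
      if w.toList.length == word.toList.length + 1
          && coversB (PySem.List.sorted w.toList (fun c => c) false) sword then
        res ++ [w]
      else res)
    []

-- ===== PRECONDITION & SPEC =====
-- A asserts that words is non-empty and word is a non-empty string; on those inputs it raises.
def Pre_valid_step_words (words : List String) (word : String) : Prop :=
  words ≠ [] ∧ word ≠ ""
instance (words : List String) (word : String) : Decidable (Pre_valid_step_words words word) := by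
  unfold Pre_valid_step_words; infer_instance
def pvWitness_valid_step_words : List String × String := (["ab"], "a")

def Spec_valid_step_words (words : List String) (word : String) (out : List String) : Prop :=
  out = valid_step_words_alt words word
instance (words : List String) (word : String) (out : List String) :
    Decidable (Spec_valid_step_words words word out) := by
  unfold Spec_valid_step_words; infer_instance

-- ===== CLAIM (what is proved, stated in full; the proofs are below) =====
def Claim_equal_valid_step_words : Prop :=
  ∀ (words : List String) (word : String), Dom_valid_step_words words word →
    Pre_valid_step_words words word →
    Spec_valid_step_words words word (valid_step_words words word)

-- ===== LEMMAS AND PROOFS =====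

theorem cons_le_iff_mem_erase {a : Char} {s t : Multiset Char} :
    a ::ₘ s ≤ t ↔ a ∈ t ∧ s ≤ t.erase a := by
  constructor
  · intro h
    have ha : a ∈ t := Multiset.mem_of_le h (Multiset.mem_cons_self a s)
    refine ⟨ha, ?_⟩
    rw [← Multiset.cons_erase ha] at h
    exact (Multiset.cons_le_cons_iff a).1 h
  · rintro ⟨ha, hs⟩
    calc a ::ₘ s ≤ a ::ₘ t.erase a := (Multiset.cons_le_cons_iff a).2 hs
      _ = t := Multiset.cons_erase ha

theorem removeLoopA_length : ∀ (cs w w' : List Char),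
    removeLoopA cs w = some w' → w'.length + cs.length = w.length := by
  intro cs
  induction cs with
  | nil => intro w w' h; simp [removeLoopA] at h; simp [h]
  | cons c cs ih =>
    intro w w' h
    simp only [removeLoopA] at h
    cases hr : PySem.List.remove? w c with
    | none => rw [hr] at h; cases h
    | some t =>
      rw [hr] at h
      have hc : c ∈ w := by
        by_contra hc
        rw [(PySem.List.remove?_eq_none_iff w c).2 hc] at hr; cases hr
      rw [PySem.List.remove?_eq_some_erase w c hc] at hr
      cases hr
      have := ih _ _ h
      have hlen := List.length_erase_add_one hc
      simp only [List.length_cons]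
      omega

theorem removeLoopA_isSome : ∀ (cs w : List Char),
    (removeLoopA cs w).isSome = true ↔ (↑cs : Multiset Char) ≤ ↑w := by
  intro cs
  induction cs with
  | nil => intro w; simp [removeLoopA]
  | cons c cs ih =>
    intro w
    simp only [removeLoopA]
    by_cases hc : c ∈ w
    · rw [PySem.List.remove?_eq_some_erase w c hc]
      rw [ih (w.erase c)]
      rw [← Multiset.cons_coe, cons_le_iff_mem_erase]
      simp [hc, Multiset.coe_erase]
    · rw [(PySem.List.remove?_eq_none_iff w c).2 hc]
      simp only [Option.isSome_none]
      rw [← Multiset.cons_coe]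
      constructor
      · intro h; cases h
      · intro h
        exact absurd (Multiset.mem_of_le h (Multiset.mem_cons_self _ _)) (by simpa using hc)

theorem coversB_iff : ∀ (sw sword : List Char),
    sw.Pairwise (· ≤ ·) → sword.Pairwise (· ≤ ·) →
    (coversB sw sword = true ↔ (↑sword : Multiset Char) ≤ ↑sw) := by
  intro sw
  induction sw with
  | nil =>
    intro sword _ _
    cases sword with
    | nil => simp [coversB]
    | cons y ys =>
      simp only [coversB, ← Multiset.cons_coe]
      constructor
      · intro h; cases h
      · intro h
        simp at h
  | cons x xs ih =>
    intro sword hsw hsword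
    cases sword with
    | nil => simp [coversB]
    | cons y ys =>
      have hxxs : ∀ z ∈ xs, x ≤ z := (List.pairwise_cons.1 hsw).1
      have hxs : xs.Pairwise (· ≤ ·) := (List.pairwise_cons.1 hsw).2
      have hyys : ∀ z ∈ ys, y ≤ z := (List.pairwise_cons.1 hsword).1
      have hys : ys.Pairwise (· ≤ ·) := (List.pairwise_cons.1 hsword).2
      simp only [coversB]
      by_cases hxy : x = y
      · subst hxy
        simp only [beq_self_eq_true, if_true]
        rw [ih ys hxs hys]
        rw [← Multiset.cons_coe, ← Multiset.cons_coe, Multiset.cons_le_cons_iff]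
      · simp only [beq_iff_eq, hxy, if_false]
        by_cases hlt : x < y
        · simp only [hlt, if_true]
          rw [ih (y :: ys) hxs hsword]
          rw [← Multiset.cons_coe (a := x)]
          have hx_not : x ∉ ((y :: ys : List Char) : Multiset Char) := by
            simp only [← Multiset.cons_coe, Multiset.mem_cons, Multiset.mem_coe]
            rintro (rfl | hz)
            · exact lt_irrefl x hlt
            · exact absurd (lt_of_lt_of_le hlt (hyys x hz)) (lt_irrefl x)
          rw [Multiset.le_cons_of_notMem hx_not]
        · simp only [hlt, if_false]
          have hyx : y < x := lt_of_le_of_ne (not_lt.1 hlt) (fun h => hxy h.symm)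
          constructor
          · intro h; cases h
          · intro h
            have hy : y ∈ ((x :: xs : List Char) : Multiset Char) := by
              rw [← Multiset.cons_coe] at h
              exact Multiset.mem_of_le h (Multiset.mem_cons_self _ _)
            simp only [Multiset.mem_coe, List.mem_cons] at hy
            rcases hy with rfl | hz
            · exact absurd hyx (lt_irrefl y)
            · exact absurd hyx (not_lt.2 (hxxs y hz))

theorem sorted_coe (l : List Char) :
    ((PySem.List.sorted l (fun c => c) false : List Char) : Multiset Char) = ↑l :=
  Multiset.coe_eq_coe.2 (PySem.List.sorted_perm l (fun c => c) false)

theorem perWord (w word : List Char) :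
    isValidA w word
      = (w.length == word.length + 1
          && coversB (PySem.List.sorted w (fun c => c) false)
                     (PySem.List.sorted word (fun c => c) false)) := by
  by_cases hl : w.length = word.length + 1
  · have hcov := coversB_iff (PySem.List.sorted w (fun c => c) false)
      (PySem.List.sorted word (fun c => c) false)
      (PySem.List.sorted_pairwise w (fun c => c))
      (PySem.List.sorted_pairwise word (fun c => c))
    rw [sorted_coe, sorted_coe] at hcov
    simp only [isValidA, hl, ne_eq, not_true_eq_false, if_false, beq_self_eq_true,
      Bool.true_and]
    by_cases hle : (↑word : Multiset Char) ≤ ↑w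
    · have hsome : (removeLoopA word w).isSome = true := (removeLoopA_isSome word w).2 hle
      cases hrl : removeLoopA word w with
      | none => rw [hrl] at hsome; cases hsome
      | some w' =>
        have hwl : w'.length + word.length = w.length := removeLoopA_length word w w' hrl
        have : w'.length = 1 := by omega
        simp [this, hcov.2 hle]
    · have hnone : removeLoopA word w = none := by
        cases hrl : removeLoopA word w with
        | none => rfl
        | some w' =>
          exact absurd ((removeLoopA_isSome word w).1 (by simp [hrl])) hle
      rw [hnone]
      have : coversB (PySem.List.sorted w (fun c => c) false)
          (PySem.List.sorted word (fun c => c) false) = false := by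
        rcases h : coversB (PySem.List.sorted w (fun c => c) false)
            (PySem.List.sorted word (fun c => c) false) with _ | _
        · rfl
        · exact absurd (hcov.1 h) hle
      simp [this]
  · simp only [isValidA, hl, ne_eq, not_false_eq_true, if_true]
    have : (w.length == word.length + 1) = false := by
      simp [hl]
    simp [this]

-- ===== VERDICT (by name: the statement is the Claim_ definition above) =====
theorem valid_step_words_spec : Claim_equal_valid_step_words := by
  intro words word _ _
  unfold Spec_valid_step_words valid_step_words valid_step_words_alt
  simp only [perWord]
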